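-- pv_equiv track=rewrite | github.com/hardanimal/Codility_Lesson-python | Excercises/Contest-2015-1.py | solution
-- ===== SOURCE A (Python) =====
-- def solution(S):
--     # Implement your solution here
--     uppercharactor_range=range(65,91)
--     lowercharactor_range=range(97,123)
--     number_range=range(48,58)
--
--     wordArray = S.split(' ')
--     charactor_count=-1
--     for word in wordArray:
--         letterCount=0
--         numberCount=0
--         f_word_validate = True
--         for c in word:
--             ascii_value = ord(c)
--             if ascii_value in uppercharactor_range:
--                 letterCount+=1
--             elif ascii_value in lowercharactor_range:
--                 letterCount+=1
--             elif ascii_value in number_range: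
--                 numberCount+=1
--             else:
--                 f_word_validate = False
--                 break
--         if f_word_validate and letterCount%2==0 and numberCount%2==1:
--             charactor_count=max(charactor_count, len(word))
--
--     return charactor_count
-- ===== SOURCE B (Python) =====
-- def solution(S):
--     # One streaming pass over S with a trailing-space sentinel: an online
--     # automaton keeps the current word's length, letter/digit parity flags and
--     # validity; no splitting into words, no counting passes.
--     best = -1
--     length = 0
--     letters_even = True
--     digits_odd = False
--     valid = True
--     for c in S + ' ':
--         if c == ' ':
--             if valid and letters_even and digits_odd:
--                 best = max(best, length)
--             length = 0
--             letters_even = True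
--             digits_odd = False
--             valid = True
--         else:
--             length += 1
--             if '0' <= c <= '9':
--                 digits_odd = not digits_odd
--             elif 'A' <= c <= 'Z' or 'a' <= c <= 'z':
--                 letters_even = not letters_even
--             else:
--                 valid = False
--     return best
-- ===== Notes on version B (the rewrite author's own statement) =====
-- stated objective: alternative
-- what changed: Instead of splitting S into words and running an inner counting loop per word, B makes one flat streaming pass over S plus a space sentinel, maintaining an online automaton (current length, letter-parity and digit-parity flags, validity) and finalizing the running maximum at each space; no split, no counts, no nested loop.
import Mathlib
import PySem

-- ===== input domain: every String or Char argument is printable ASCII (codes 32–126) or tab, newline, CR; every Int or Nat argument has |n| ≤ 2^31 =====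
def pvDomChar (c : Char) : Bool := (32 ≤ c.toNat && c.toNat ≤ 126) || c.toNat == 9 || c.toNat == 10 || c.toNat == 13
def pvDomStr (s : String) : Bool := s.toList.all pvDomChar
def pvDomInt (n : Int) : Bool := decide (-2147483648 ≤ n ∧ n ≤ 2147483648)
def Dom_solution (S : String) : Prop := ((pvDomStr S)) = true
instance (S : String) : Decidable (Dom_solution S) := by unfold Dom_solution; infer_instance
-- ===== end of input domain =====

-- B replaces A's split-into-words + inner counting loop by ONE streaming pass
-- over S plus a space sentinel, keeping length/parity flags of the current
-- word; objective: alternative (same cost, different algorithm shape).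

-- ===== PORT A =====
-- inner `for c in word` loop with break: (letterCount, numberCount, f_word_validate)
def solScan : List Char → Int → Int → Int × Int × Bool
  | [], l, n => (l, n, true)
  | c :: cs, l, n =>
    let a : Int := (c.toNat : Int)
    if 65 ≤ a ∧ a < 91 then solScan cs (l + 1) n
    else if 97 ≤ a ∧ a < 123 then solScan cs (l + 1) n
    else if 48 ≤ a ∧ a < 58 then solScan cs l (n + 1)
    else (l, n, false)

def solution (S : String) : Int :=
  let wordArray := PySem.Chars.splitOn S.toList [' ']
  wordArray.foldl
    (fun charactor_count word =>
      let r := solScan word 0 0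
      if r.2.2 && (r.1 % 2 == 0) && (r.2.1 % 2 == 1) then
        max charactor_count (PySem.Chars.len word)
      else charactor_count)
    (-1)

-- ===== PORT B =====
-- the body of Source B's single `for c in S + ' '` loop; state =
-- (best, length, letters_even, digits_odd, valid)
def altStep (st : Int × Int × Bool × Bool × Bool) (c : Char) : Int × Int × Bool × Bool × Bool :=
  let best := st.1; let length := st.2.1
  let lettersEven := st.2.2.1; let digitsOdd := st.2.2.2.1; let valid := st.2.2.2.2
  if c == ' ' then
    ((if valid && lettersEven && digitsOdd then max best length else best),
     0, true, false, true)
  else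
    if '0' ≤ c && c ≤ '9' then
      (best, length + 1, lettersEven, !digitsOdd, valid)
    else if ('A' ≤ c && c ≤ 'Z') || ('a' ≤ c && c ≤ 'z') then
      (best, length + 1, !lettersEven, digitsOdd, valid)
    else
      (best, length + 1, lettersEven, digitsOdd, false)

def solution_alt (S : String) : Int :=
  ((S.toList ++ [' ']).foldl altStep (-1, 0, true, false, true)).1

-- ===== PRECONDITION & SPEC =====
def Spec_solution (S : String) (out : Int) : Prop := out = solution_alt S
instance (S : String) (out : Int) : Decidable (Spec_solution S out) := by unfold Spec_solution; infer_instance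

-- ===== CLAIM (what is proved, stated in full; the proofs are below) =====
def Claim_equal_solution : Prop := ∀ (S : String), Dom_solution S → Spec_solution S (solution S)

-- ===== LEMMAS AND PROOFS =====

def isDigitC (c : Char) : Bool := '0' ≤ c && c ≤ '9'
def isLetterC (c : Char) : Bool := ('A' ≤ c && c ≤ 'Z') || ('a' ≤ c && c ≤ 'z')
def validC (c : Char) : Bool := isDigitC c || isLetterC c

theorem charle_iff (a c : Char) : (a ≤ c) ↔ a.toNat ≤ c.toNat := by
  simp [Char.le_def, UInt32.le_iff_toNat_le]

theorem isDigitC_iff (c : Char) :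
    isDigitC c = true ↔ 48 ≤ c.toNat ∧ c.toNat < 58 := by
  have h0 : ('0').toNat = 48 := rfl
  have h9 : ('9').toNat = 57 := rfl
  simp only [isDigitC, Bool.and_eq_true, decide_eq_true_eq, charle_iff, h0, h9]
  omega

theorem isLetterC_iff (c : Char) :
    isLetterC c = true ↔ (65 ≤ c.toNat ∧ c.toNat < 91) ∨ (97 ≤ c.toNat ∧ c.toNat < 123) := by
  have hA : ('A').toNat = 65 := rfl
  have hZ : ('Z').toNat = 90 := rfl
  have ha : ('a').toNat = 97 := rfl
  have hz : ('z').toNat = 122 := rfl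
  simp only [isLetterC, Bool.or_eq_true, Bool.and_eq_true, decide_eq_true_eq, charle_iff,
    hA, hZ, ha, hz]
  omega

theorem not_both (c : Char) : ¬ (isDigitC c = true ∧ isLetterC c = true) := by
  rw [isDigitC_iff, isLetterC_iff]; omega

-- when every character is valid, A's scan returns the two counts and True
theorem scan_valid (w : List Char) : ∀ l n : Int, w.all validC = true →
    solScan w l n = (l + (w.countP isLetterC : Int), n + (w.countP isDigitC : Int), true) := by
  induction w with
  | nil => intro l n _; simp [solScan]
  | cons c cs ih =>
    intro l n hall
    simp only [List.all_cons, Bool.and_eq_true] at hall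
    obtain ⟨hc, hcs⟩ := hall
    simp only [validC, Bool.or_eq_true] at hc
    rw [solScan]
    rcases hc with hd | hl
    · have hd' := (isDigitC_iff c).mp hd
      have hnl : isLetterC c = false := by
        rcases h : isLetterC c with _ | _
        · rfl
        · exact absurd ((isLetterC_iff c).mp h) (by omega)
      rw [if_neg (by omega), if_neg (by omega), if_pos (by omega), ih _ _ hcs]
      simp only [List.countP_cons, hnl, hd]
      push_cast
      refine Prod.ext (by ring_nf) (Prod.ext (by ring_nf) rfl)
    · have hl' := (isLetterC_iff c).mp hl
      have hnd : isDigitC c = false := by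
        rcases h : isDigitC c with _ | _
        · rfl
        · exact absurd ((isDigitC_iff c).mp h) (by omega)
      have hgoal : solScan cs (l + 1) n
          = (l + ((c :: cs).countP isLetterC : Int), n + ((c :: cs).countP isDigitC : Int), true) := by
        rw [ih _ _ hcs]
        simp only [List.countP_cons, hnd, hl]
        push_cast
        refine Prod.ext (by ring_nf) (Prod.ext (by ring_nf) rfl)
      rcases hl' with h1 | h2
      · rw [if_pos (by omega)]; exact hgoal
      · rw [if_neg (by omega), if_pos (by omega)]; exact hgoal

-- when some character is invalid, A's scan reports False
theorem scan_invalid (w : List Char) : ∀ l n : Int, w.all validC = false →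
    (solScan w l n).2.2 = false := by
  induction w with
  | nil => intro l n h; simp at h
  | cons c cs ih =>
    intro l n hall
    simp only [List.all_cons, Bool.and_eq_false_iff] at hall
    rw [solScan]
    by_cases h1 : (65:Int) ≤ (c.toNat : Int) ∧ (c.toNat : Int) < 91
    · rw [if_pos h1]
      rcases hall with hc | hcs
      · exact absurd (show validC c = true by
          simp [validC, (isLetterC_iff c).mpr (by omega)]) (by simp [hc])
      · exact ih _ _ hcs
    · rw [if_neg h1]
      by_cases h2 : (97:Int) ≤ (c.toNat : Int) ∧ (c.toNat : Int) < 123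
      · rw [if_pos h2]
        rcases hall with hc | hcs
        · exact absurd (show validC c = true by
            simp [validC, (isLetterC_iff c).mpr (by omega)]) (by simp [hc])
        · exact ih _ _ hcs
      · rw [if_neg h2]
        by_cases h3 : (48:Int) ≤ (c.toNat : Int) ∧ (c.toNat : Int) < 58
        · rw [if_pos h3]
          rcases hall with hc | hcs
          · exact absurd (show validC c = true by
              simp [validC, (isDigitC_iff c).mpr (by omega)]) (by simp [hc])
          · exact ih _ _ hcs
        · rw [if_neg h3]

-- A's per-word acceptance condition, in terms of counts and validity
theorem condA_eq (w : List Char) :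
    ((solScan w 0 0).2.2 && ((solScan w 0 0).1 % 2 == 0) && ((solScan w 0 0).2.1 % 2 == 1))
      = (w.all validC && (w.countP isLetterC % 2 == 0) && (w.countP isDigitC % 2 == 1)) := by
  rcases hall : w.all validC with _ | _
  · rw [scan_invalid w 0 0 hall]; simp
  · rw [scan_valid w 0 0 hall]
    simp only [Bool.true_and, zero_add]
    have hL : (((w.countP isLetterC : Int)) % 2 == 0) = (w.countP isLetterC % 2 == 0) := by
      rcases h : (w.countP isLetterC % 2 == 0) with _ | _ <;> simp [beq_iff_eq] at h ⊢ <;> omega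
    have hD : (((w.countP isDigitC : Int)) % 2 == 1) = (w.countP isDigitC % 2 == 1) := by
      rcases h : (w.countP isDigitC % 2 == 1) with _ | _ <;> simp [beq_iff_eq] at h ⊢ <;> omega
    rw [hL, hD]

-- A's per-word fold step, named
def stepA (best : Int) (word : List Char) : Int :=
  let r := solScan word 0 0
  if r.2.2 && (r.1 % 2 == 0) && (r.2.1 % 2 == 1) then
    max best (PySem.Chars.len word)
  else best

-- split on a single space, recursively (cur = current chunk, reversed)
def W : List Char → List Char → List (List Char)
  | [], cur => [cur.reverse]
  | c :: cs, cur => if c = ' ' then cur.reverse :: W cs [] else W cs (c :: cur)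

theorem go_eq_W : ∀ (fuel : Nat) (l cur : List Char) (acc : List (List Char)),
    l.length < fuel →
    PySem.Chars.splitOn.go [' '] fuel l cur acc = acc.reverse ++ W l cur := by
  intro fuel
  induction fuel with
  | zero => intro l cur acc h; omega
  | succ fuel ih =>
    intro l cur acc h
    cases l with
    | nil => simp [PySem.Chars.splitOn.go, W]
    | cons c cs =>
      rw [PySem.Chars.splitOn.go]
      by_cases hc : c = ' '
      · have hp : List.isPrefixOf [' '] (c :: cs) = true := by
          simp [List.isPrefixOf, hc]
        rw [if_pos hp]
        have : List.drop (List.length [' ']) (c :: cs) = cs := by simp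
        rw [this, ih cs [] (cur.reverse :: acc) (by simp at h ⊢; omega)]
        simp [W, hc]
      · have hp : List.isPrefixOf [' '] (c :: cs) = false := by
          simp [List.isPrefixOf]
          exact fun h' => absurd h'.symm hc
        rw [if_neg (by simp [hp])]
        rw [ih cs (c :: cur) acc (by simp at h ⊢; omega)]
        simp [W, hc]

theorem splitOn_eq_W (s : List Char) :
    PySem.Chars.splitOn s [' '] = W s [] := by
  rw [PySem.Chars.splitOn, go_eq_W (s.length + 1) s [] [] (by omega)]
  simp

-- parity-flip facts
theorem parity_flip_one (n : Nat) : ((n + 1) % 2 == 0) = !(n % 2 == 0) := by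
  rcases h : (n % 2 == 0) with _ | _ <;> simp [beq_iff_eq] at h ⊢ <;> omega

theorem parity_flip_one' (n : Nat) : ((n + 1) % 2 == 1) = !(n % 2 == 1) := by
  rcases h : (n % 2 == 1) with _ | _ <;> simp [beq_iff_eq] at h ⊢ <;> omega

-- the sentinel/space step of B, evaluated
theorem altStep_space (st : Int × Int × Bool × Bool × Bool) :
    altStep st ' '
      = ((if st.2.2.2.2 && st.2.2.1 && st.2.2.2.1 then max st.1 st.2.1 else st.1),
         0, true, false, true) := rfl

-- the streaming invariant: B's fold over the rest of the string plus the
-- sentinel, started in the state describing the current chunk `cur`,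
-- computes A's fold over the words W l cur
theorem stream_eq : ∀ (l cur : List Char) (best : Int),
    ((l ++ [' ']).foldl altStep
        (best, (cur.length : Int),
         cur.countP isLetterC % 2 == 0, cur.countP isDigitC % 2 == 1,
         cur.all validC)).1
      = (W l cur).foldl stepA best := by
  intro l
  induction l with
  | nil =>
    intro cur best
    simp only [List.nil_append, List.foldl_cons, List.foldl_nil, W]
    rw [altStep_space, stepA]
    dsimp only
    rw [condA_eq]
    simp [List.countP_reverse, List.all_reverse, PySem.Chars.len]
  | cons c cs ih =>
    intro cur best
    simp only [List.cons_append, List.foldl_cons]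
    by_cases hc : c = ' '
    · subst hc
      rw [W, if_pos rfl]
      simp only [List.foldl_cons]
      rw [altStep_space]
      dsimp only
      have hA : (if (cur.all validC && (List.countP isLetterC cur % 2 == 0)
            && (List.countP isDigitC cur % 2 == 1)) = true
          then max best (cur.length : Int) else best) = stepA best cur.reverse := by
        rw [stepA, condA_eq]
        simp [List.countP_reverse, List.all_reverse, PySem.Chars.len]
      rw [hA]
      exact ih [] (stepA best cur.reverse)
    · rw [W, if_neg hc]
      have hstep : altStep (best, (cur.length : Int),
          cur.countP isLetterC % 2 == 0, cur.countP isDigitC % 2 == 1, cur.all validC) c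
          = (best, ((c :: cur).length : Int),
             (c :: cur).countP isLetterC % 2 == 0, (c :: cur).countP isDigitC % 2 == 1,
             (c :: cur).all validC) := by
        rw [altStep]
        have hcne : (c == ' ') = false := by simp [hc]
        rw [if_neg (by simp [hcne])]
        simp only [List.length_cons, List.countP_cons, List.all_cons, Nat.cast_add, Nat.cast_one]
        by_cases hd : isDigitC c = true
        · have hnl : isLetterC c = false := by
            rcases h : isLetterC c with _ | _
            · rfl
            · exact absurd ⟨hd, h⟩ (not_both c)
          rw [if_pos (by simpa [isDigitC] using hd)]
          simp [hd, hnl, validC, parity_flip_one']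
        · have hd' : isDigitC c = false := by simpa using hd
          rw [if_neg (by simpa [isDigitC] using hd)]
          by_cases hl : isLetterC c = true
          · rw [if_pos (by simpa [isLetterC] using hl)]
            simp [hd', hl, validC, parity_flip_one]
          · have hl' : isLetterC c = false := by simpa using hl
            rw [if_neg (by simpa [isLetterC] using hl)]
            simp [hd', hl', validC]
      rw [hstep]
      exact ih (c :: cur) best

-- ===== VERDICT (by name: the statement is the Claim_ definition above) =====
theorem solution_spec : Claim_equal_solution := by
  intro S _
  unfold Spec_solution solution solution_alt
  rw [splitOn_eq_W]
  exact (stream_eq S.toList [] (-1)).symm
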